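-- pv_equiv track=rewrite | github.com/syriacoppola25-its/analisitesto | interfaccia.py | spaziepunti
-- ===== SOURCE A (Python) =====
-- def spaziepunti (testodato):
--     punteggiatura = [".", ",", ":", ";", "!", "?"]
--     p = 0 #un contatore per i punti
--     s = 0 #un contatore per gli spazi
--     for i in testodato:
--         if i in punteggiatura:
--             p += 1
--         elif i == " ":
--             s += 1
--     return s, p
-- ===== SOURCE B (Python) =====
-- from collections import Counter
--
-- def spaziepunti(testodato):
--     counts = Counter(testodato)
--     s = counts.get(" ", 0)
--     p = sum(counts.get(c, 0) for c in ".,:;!?")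
--     return s, p
-- ===== Notes on version B (the rewrite author's own statement) =====
-- stated objective: faster
-- what changed: B builds a full character-frequency table with collections.Counter in one C-level call and computes both answers by table lookup/sum, replacing A's interpreted per-character branching loop.
import Mathlib
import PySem

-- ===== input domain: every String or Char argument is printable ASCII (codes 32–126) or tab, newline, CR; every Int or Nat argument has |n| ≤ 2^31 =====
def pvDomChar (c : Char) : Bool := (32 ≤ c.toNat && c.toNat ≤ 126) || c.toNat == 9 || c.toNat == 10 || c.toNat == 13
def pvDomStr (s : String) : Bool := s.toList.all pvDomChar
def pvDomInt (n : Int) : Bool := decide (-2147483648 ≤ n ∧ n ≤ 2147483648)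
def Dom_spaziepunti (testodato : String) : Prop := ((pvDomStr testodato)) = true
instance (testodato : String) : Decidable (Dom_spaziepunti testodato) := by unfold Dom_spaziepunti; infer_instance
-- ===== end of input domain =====

-- B builds a character-frequency table (Counter) once and reads both answers off the table; A counts with per-character branching.

-- ===== PORT A =====
-- literal port: loop over the characters, bump p on punctuation, else s on space
def spaziepuntiLoop (punteggiatura : List Char) : List Char → Int → Int → Int × Int
  | [], p, s => (s, p)
  | i :: rest, p, s =>
    if i ∈ punteggiatura then spaziepuntiLoop punteggiatura rest (p + 1) s
    else if i = ' ' then spaziepuntiLoop punteggiatura rest p (s + 1)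
    else spaziepuntiLoop punteggiatura rest p s

def spaziepunti (testodato : String) : Int × Int :=
  let punteggiatura : List Char := ['.', ',', ':', ';', '!', '?']
  spaziepuntiLoop punteggiatura testodato.toList 0 0

-- ===== PORT B =====
-- literal port of Source B: Counter(testodato), then get(' ',0) and a sum of gets over ".,:;!?"
def spaziepunti_alt (testodato : String) : Int × Int :=
  let counts : PySem.Dict Char Int := PySem.Dict.counter testodato.toList
  let s : Int := counts.getD ' ' 0
  let p : Int := ((".,:;!?".toList).map (fun c => counts.getD c 0)).sum
  (s, p)

-- ===== PRECONDITION & SPEC =====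
def Spec_spaziepunti (testodato : String) (out : Int × Int) : Prop := out = spaziepunti_alt testodato
instance (testodato : String) (out : Int × Int) : Decidable (Spec_spaziepunti testodato out) := by unfold Spec_spaziepunti; infer_instance

-- ===== CLAIM (what is proved, stated in full; the proofs are below) =====
def Claim_equal_spaziepunti : Prop := ∀ (testodato : String), Dom_spaziepunti testodato → Spec_spaziepunti testodato (spaziepunti testodato)

-- ===== LEMMAS AND PROOFS =====

-- A's loop, characterised: it adds the space count to s and the punctuation count to p
theorem spaziepunti_loop_eq (l : List Char) (p s : Int) :
    spaziepuntiLoop ['.', ',', ':', ';', '!', '?'] l p s =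
      (s + l.count ' ',
       p + (l.count '.' + l.count ',' + l.count ':' + l.count ';' + l.count '!' + l.count '?')) := by
  induction l generalizing p s with
  | nil => simp [spaziepuntiLoop]
  | cons i rest ih =>
    simp only [spaziepuntiLoop]
    by_cases h : i ∈ (['.', ',', ':', ';', '!', '?'] : List Char)
    · rw [if_pos h, ih]
      fin_cases h <;> simp <;> ring
    · rw [if_neg h]
      simp only [List.mem_cons, List.not_mem_nil] at h
      push Not at h
      by_cases hs : i = ' '
      · rw [if_pos hs, ih]
        subst hs
        simp [h.1, h.2.1, h.2.2.1, h.2.2.2.1, h.2.2.2.2.1, h.2.2.2.2.2]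
        ring
      · rw [if_neg hs, ih]
        simp [h.1, h.2.1, h.2.2.1, h.2.2.2.1, h.2.2.2.2.1, h.2.2.2.2.2, hs]

-- ===== VERDICT (by name: the statement is the Claim_ definition above) =====
theorem spaziepunti_spec : Claim_equal_spaziepunti := by
  intro t _
  show spaziepunti t = spaziepunti_alt t
  unfold spaziepunti spaziepunti_alt
  rw [spaziepunti_loop_eq]
  simp [PySem.Dict.getD_counter]
  ring
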